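-- pv_equiv track=rewrite | github.com/Gurdeep123singh/mca_python | python/practice python/length_of_string_using_recursion.py | length1
-- ===== SOURCE A (Python) =====
-- def length1(string,count):     # defining length function
--  list1=[]                      # initialising list
--  if string=='':                # if string is empty then return list
--      return count
--  else:
--      count=count+1                  # incrementing the count with 1
--      string=string[1:len(string)]     # string is given 2nd element to length of string
--      length=length1(string,count)     # storing value in length variable
--      return length                    # returning length
-- ===== SOURCE B (Python) =====
-- def length1(string, count):
--     # closed form: the recursion just adds one per character
--     return count + len(string)
-- ===== Notes on version B (the rewrite author's own statement) =====
-- stated objective: simpler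
-- what changed: Replaces the one-character-at-a-time recursive stripping with the closed form count + len(string).
import Mathlib
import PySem

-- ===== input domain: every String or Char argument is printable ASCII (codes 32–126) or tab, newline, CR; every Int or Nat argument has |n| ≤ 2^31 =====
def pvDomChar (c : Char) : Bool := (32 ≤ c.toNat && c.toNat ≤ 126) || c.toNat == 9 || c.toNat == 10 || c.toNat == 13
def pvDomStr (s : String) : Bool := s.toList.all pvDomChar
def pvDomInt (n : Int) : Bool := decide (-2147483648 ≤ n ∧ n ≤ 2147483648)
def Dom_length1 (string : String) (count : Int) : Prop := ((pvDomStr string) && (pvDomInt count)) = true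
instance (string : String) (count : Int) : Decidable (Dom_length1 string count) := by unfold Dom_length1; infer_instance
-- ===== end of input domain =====

-- B replaces A's per-character recursive stripping with the closed form count + len(string).

-- ===== PORT A =====
-- termination helper for the port's recursion: string[1:len(string)] on a nonempty string is its tail
theorem pvSliceTail (c : Char) (t : List Char) :
    PySem.List.slice (c :: t) (some 1) (some (PySem.Chars.len (c :: t))) = t := by
  rw [PySem.List.slice_toNat _ (by omega) (by simp [PySem.Chars.len_eq]; omega)]
  simp [PySem.Chars.len_eq]

-- recursion of A, on the string's code points (string == '' ↔ cs = []; string[1:len(string)] via PySem slice)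
def length1Go (cs : List Char) (count : Int) : Int :=
  if h : cs = [] then count
  else
    length1Go (PySem.List.slice cs (some 1) (some (PySem.Chars.len cs))) (count + 1)
termination_by cs.length
decreasing_by
  cases cs with
  | nil => exact absurd rfl h
  | cons c t => rw [pvSliceTail]; simp

def length1 (string : String) (count : Int) : Int := length1Go string.toList count

-- ===== PORT B =====
def length1_alt (string : String) (count : Int) : Int := count + PySem.Str.len string

-- ===== PRECONDITION & SPEC =====
def Spec_length1 (string : String) (count : Int) (out : Int) : Prop := out = length1_alt string count
instance (string : String) (count : Int) (out : Int) : Decidable (Spec_length1 string count out) := by unfold Spec_length1; infer_instance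

-- ===== CLAIM (what is proved, stated in full; the proofs are below) =====
def Claim_equal_length1 : Prop := ∀ (string : String) (count : Int), Dom_length1 string count → Spec_length1 string count (length1 string count)

-- ===== LEMMAS AND PROOFS =====
theorem length1Go_eq (cs : List Char) : ∀ count : Int, length1Go cs count = count + cs.length := by
  induction cs with
  | nil => intro count; simp [length1Go]
  | cons c t ih =>
    intro count
    rw [length1Go, dif_neg (by simp), pvSliceTail, ih]
    simp only [List.length_cons]
    push_cast
    ring

-- ===== VERDICT (by name: the statement is the Claim_ definition above) =====
theorem length1_spec : Claim_equal_length1 := by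
  intro string count _
  unfold Spec_length1 length1 length1_alt
  rw [length1Go_eq]
  simp [PySem.Str.len]
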